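-- pv_equiv track=rewrite | github.com/wuxiyang1996/Video_Skills | env_wrappers/sokoban_nl_wrapper.py | detect_corner_deadlocks
-- ===== SOURCE A (Python) =====
-- from typing import Any, Callable, Dict, List, Optional, Set, Tuple, Union
--
-- _WALL_CHARS = {"#"}
--
-- def _is_wall(grid: List[List[str]], r: int, c: int) -> bool:
--     """True if (r, c) is out of bounds or a wall."""
--     if r < 0 or r >= len(grid):
--         return True
--     if c < 0 or c >= len(grid[r]):
--         return True
--     return grid[r][c] in _WALL_CHARS
--
-- def _get_targets(grid: List[List[str]]) -> Set[Tuple[int, int]]: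
--     targets = set()
--     for r, row in enumerate(grid):
--         for c, ch in enumerate(row):
--             if ch in ("?", "*", "+"):
--                 targets.add((r, c))
--     return targets
--
-- def detect_corner_deadlocks(
--     grid: List[List[str]],
--     targets: Optional[Set[Tuple[int, int]]] = None,
-- ) -> List[Tuple[int, int]]:
--     """Detect boxes in simple corner deadlocks (two perpendicular walls)."""
--     if targets is None:
--         targets = _get_targets(grid)
--     deadlocked: List[Tuple[int, int]] = []
--     for r, row in enumerate(grid):
--         for c, ch in enumerate(row):
--             if ch != "$":
--                 continue
--             # Box already on target is fine
--             if (r, c) in targets: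
--                 continue
--             wall_up = _is_wall(grid, r - 1, c)
--             wall_down = _is_wall(grid, r + 1, c)
--             wall_left = _is_wall(grid, r, c - 1)
--             wall_right = _is_wall(grid, r, c + 1)
--             if (wall_up or wall_down) and (wall_left or wall_right):
--                 deadlocked.append((r, c))
--     return deadlocked
-- ===== SOURCE B (Python) =====
-- from typing import List, Optional, Set, Tuple
--
-- _WALL_CHARS = {"#"}
--
-- def _is_wall(grid: List[List[str]], r: int, c: int) -> bool:
--     if r < 0 or r >= len(grid):
--         return True
--     if c < 0 or c >= len(grid[r]):
--         return True
--     return grid[r][c] in _WALL_CHARS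
--
-- def _get_targets(grid: List[List[str]]) -> Set[Tuple[int, int]]:
--     targets = set()
--     for r, row in enumerate(grid):
--         for c, ch in enumerate(row):
--             if ch in ("?", "*", "+"):
--                 targets.add((r, c))
--     return targets
--
-- def detect_corner_deadlocks(
--     grid: List[List[str]],
--     targets: Optional[Set[Tuple[int, int]]] = None,
-- ) -> List[Tuple[int, int]]:
--     """Two passes: precompute the table of corner-dead squares, then filter boxes."""
--     if targets is None:
--         targets = _get_targets(grid)
--     # pass 1: dead-square table, one Boolean per cell
--     dead = [
--         [
--             (_is_wall(grid, r - 1, c) or _is_wall(grid, r + 1, c))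
--             and (_is_wall(grid, r, c - 1) or _is_wall(grid, r, c + 1))
--             for c, _ in enumerate(row)
--         ]
--         for r, row in enumerate(grid)
--     ]
--     # pass 2: keep the off-target boxes standing on a dead square
--     return [
--         (r, c)
--         for r, row in enumerate(grid)
--         for c, ch in enumerate(row)
--         if ch == "$" and (r, c) not in targets and dead[r][c]
--     ]
-- ===== Notes on version B (the rewrite author's own statement) =====
-- stated objective: alternative
-- what changed: Replaces A's single accumulator loop (walls recomputed inline per box) by the standard Sokoban two-pass decomposition: first build a full table of corner-dead squares, then filter the boxes through it with a comprehension.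
import Mathlib
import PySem

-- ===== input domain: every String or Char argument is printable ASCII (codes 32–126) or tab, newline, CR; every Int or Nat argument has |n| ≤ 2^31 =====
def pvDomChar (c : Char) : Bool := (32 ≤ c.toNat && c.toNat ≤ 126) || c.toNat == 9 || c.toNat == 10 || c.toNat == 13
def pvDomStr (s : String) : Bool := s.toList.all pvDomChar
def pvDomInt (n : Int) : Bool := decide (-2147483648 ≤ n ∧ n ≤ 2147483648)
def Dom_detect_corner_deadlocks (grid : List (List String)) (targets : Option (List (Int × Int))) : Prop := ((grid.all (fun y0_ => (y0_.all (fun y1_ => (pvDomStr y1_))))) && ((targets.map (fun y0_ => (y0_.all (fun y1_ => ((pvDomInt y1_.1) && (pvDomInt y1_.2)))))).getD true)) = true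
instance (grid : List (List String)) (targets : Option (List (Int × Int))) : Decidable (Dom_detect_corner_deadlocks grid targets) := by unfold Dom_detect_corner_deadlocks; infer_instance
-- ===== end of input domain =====

-- B rewrites A as the standard Sokoban two-pass decomposition (dead-square table, then
-- a filter of the boxes through it); same result, no speed claim.

-- ===== PORT A =====
-- shared helper: Python _is_wall (used verbatim by both A and B)
def pv_is_wall (grid : List (List String)) (r c : Int) : Bool :=
  if r < 0 || (grid.length : Int) ≤ r then true
  else
    let row := PySem.List.pyGetD grid r []
    if c < 0 || (row.length : Int) ≤ c then true
    else PySem.List.pyGetD row c "" == "#"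

-- shared helper: Python _get_targets (used verbatim by both A and B)
def pv_get_targets (grid : List (List String)) : List (Int × Int) :=
  (PySem.List.enumerate grid).foldl (fun tset rrow =>
    (PySem.List.enumerate rrow.2).foldl (fun tset cch =>
      if cch.2 == "?" || cch.2 == "*" || cch.2 == "+" then
        PySem.Set.add tset (rrow.1, cch.1)
      else tset) tset) []

def detect_corner_deadlocks (grid : List (List String)) (targets : Option (List (Int × Int))) : List (Int × Int) :=
  let tg := match targets with
    | none => pv_get_targets grid
    | some t => t
  (PySem.List.enumerate grid).foldl (fun acc rrow =>
    (PySem.List.enumerate rrow.2).foldl (fun acc cch =>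
      if cch.2 != "$" then acc
      else if tg.contains (rrow.1, cch.1) then acc
      else
        let wall_up := pv_is_wall grid (rrow.1 - 1) cch.1
        let wall_down := pv_is_wall grid (rrow.1 + 1) cch.1
        let wall_left := pv_is_wall grid rrow.1 (cch.1 - 1)
        let wall_right := pv_is_wall grid rrow.1 (cch.1 + 1)
        if (wall_up || wall_down) && (wall_left || wall_right) then
          acc ++ [(rrow.1, cch.1)]
        else acc) acc) []

-- ===== PORT B =====
-- pass 1 of B: the table of corner-dead squares
def pv_dead_table (grid : List (List String)) : List (List Bool) :=
  (PySem.List.enumerate grid).map (fun rrow =>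
    (PySem.List.enumerate rrow.2).map (fun cch =>
      (pv_is_wall grid (rrow.1 - 1) cch.1 || pv_is_wall grid (rrow.1 + 1) cch.1) &&
      (pv_is_wall grid rrow.1 (cch.1 - 1) || pv_is_wall grid rrow.1 (cch.1 + 1))))

def detect_corner_deadlocks_alt (grid : List (List String)) (targets : Option (List (Int × Int))) : List (Int × Int) :=
  let tg := match targets with
    | none => pv_get_targets grid
    | some t => t
  let dead := pv_dead_table grid
  (PySem.List.enumerate grid).flatMap (fun rrow =>
    (PySem.List.enumerate rrow.2).filterMap (fun cch =>
      if cch.2 == "$" && !tg.contains (rrow.1, cch.1) &&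
         PySem.List.pyGetD (PySem.List.pyGetD dead rrow.1 []) cch.1 false then
        some (rrow.1, cch.1)
      else none))

-- ===== PRECONDITION & SPEC =====
def Spec_detect_corner_deadlocks (grid : List (List String)) (targets : Option (List (Int × Int))) (out : List (Int × Int)) : Prop := out = detect_corner_deadlocks_alt grid targets
instance (grid : List (List String)) (targets : Option (List (Int × Int))) (out : List (Int × Int)) : Decidable (Spec_detect_corner_deadlocks grid targets out) := by unfold Spec_detect_corner_deadlocks; infer_instance

-- ===== CLAIM (what is proved, stated in full; the proofs are below) =====
def Claim_equal_detect_corner_deadlocks : Prop := ∀ (grid : List (List String)) (targets : Option (List (Int × Int))), Dom_detect_corner_deadlocks grid targets → Spec_detect_corner_deadlocks grid targets (detect_corner_deadlocks grid targets)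

-- ===== LEMMAS AND PROOFS =====

lemma filterMap_if {α β : Type} (p : α → Bool) (f : α → β) (l : List α) :
    l.filterMap (fun x => if p x then some (f x) else none) = (l.filter p).map f := by
  induction l with
  | nil => rfl
  | cons x xs ih =>
    by_cases h : p x <;> simp [List.filter_cons, h, ih]

lemma flatMap_congr_mem {α β : Type} {l : List α} {f g : α → List β}
    (h : ∀ x ∈ l, f x = g x) : l.flatMap f = l.flatMap g := by
  induction l with
  | nil => rfl
  | cons x xs ih =>
    simp only [List.flatMap_cons]
    rw [h x (by simp), ih (fun y hy => h y (by simp [hy]))]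

-- looking up the dead-square table at an enumerated cell gives the corner predicate
lemma dead_lookup (grid : List (List String)) {rrow : Int × List String}
    {cch : Int × String}
    (hr : rrow ∈ PySem.List.enumerate grid)
    (hc : cch ∈ PySem.List.enumerate rrow.2) :
    PySem.List.pyGetD (PySem.List.pyGetD (pv_dead_table grid) rrow.1 []) cch.1 false =
      ((pv_is_wall grid (rrow.1 - 1) cch.1 || pv_is_wall grid (rrow.1 + 1) cch.1) &&
       (pv_is_wall grid rrow.1 (cch.1 - 1) || pv_is_wall grid rrow.1 (cch.1 + 1))) := by
  rcases (PySem.List.mem_enumerate_iff _ _ _).1 hr with ⟨k, hk, hrk⟩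
  rcases (PySem.List.mem_enumerate_iff _ _ _).1 hc with ⟨j, hj, hcj⟩
  subst hrk
  have h1 : PySem.List.pyGetD (pv_dead_table grid) ((0 : Int) + (k : Int)) [] =
      (PySem.List.enumerate (grid[k])).map (fun cch =>
        (pv_is_wall grid ((0 : Int) + (k : Int) - 1) cch.1 || pv_is_wall grid ((0 : Int) + (k : Int) + 1) cch.1) &&
        (pv_is_wall grid ((0 : Int) + (k : Int)) (cch.1 - 1) || pv_is_wall grid ((0 : Int) + (k : Int)) (cch.1 + 1))) := by
    have : ((0 : Int) + (k : Int)) = ((k : Nat) : Int) := by omega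
    rw [this, PySem.List.pyGetD_natCast]
    simp [pv_dead_table, List.getD_eq_getElem?_getD, PySem.List.getElem_enumerate, hk]
  rw [h1]
  simp only at hcj
  subst hcj
  have h2 : ((0 : Int) + (j : Int)) = ((j : Nat) : Int) := by omega
  rw [h2, PySem.List.pyGetD_natCast]
  simp [List.getD_eq_getElem?_getD, PySem.List.getElem_enumerate, hj]

-- A's inner loop over one row, as an append of a filtered map
lemma inner_eq (grid : List (List String)) (tg : List (Int × Int))
    (rrow : Int × List String) (acc : List (Int × Int)) :
    (PySem.List.enumerate rrow.2).foldl (fun acc cch =>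
      if cch.2 != "$" then acc
      else if tg.contains (rrow.1, cch.1) then acc
      else
        let wall_up := pv_is_wall grid (rrow.1 - 1) cch.1
        let wall_down := pv_is_wall grid (rrow.1 + 1) cch.1
        let wall_left := pv_is_wall grid rrow.1 (cch.1 - 1)
        let wall_right := pv_is_wall grid rrow.1 (cch.1 + 1)
        if (wall_up || wall_down) && (wall_left || wall_right) then
          acc ++ [(rrow.1, cch.1)]
        else acc) acc =
    acc ++ ((PySem.List.enumerate rrow.2).filter (fun cch =>
        cch.2 == "$" && !tg.contains (rrow.1, cch.1) &&
        ((pv_is_wall grid (rrow.1 - 1) cch.1 || pv_is_wall grid (rrow.1 + 1) cch.1) &&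
         (pv_is_wall grid rrow.1 (cch.1 - 1) || pv_is_wall grid rrow.1 (cch.1 + 1))))).map
      (fun cch => (rrow.1, cch.1)) := by
  rw [← PySem.List.foldl_append_if]
  apply PySem.List.foldl_congr_mem
  intro a cch _
  by_cases h1 : cch.2 = "$"
  · by_cases h2 : (rrow.1, cch.1) ∈ tg
    · simp [h1, h2]
    · by_cases h3 : ((pv_is_wall grid (rrow.1 - 1) cch.1 || pv_is_wall grid (rrow.1 + 1) cch.1) &&
          (pv_is_wall grid rrow.1 (cch.1 - 1) || pv_is_wall grid rrow.1 (cch.1 + 1))) = true <;>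
        simp [h1, h2, h3]
  · simp [h1]

lemma main_eq (grid : List (List String)) (tg : List (Int × Int)) :
    (PySem.List.enumerate grid).foldl (fun acc rrow =>
      (PySem.List.enumerate rrow.2).foldl (fun acc cch =>
        if cch.2 != "$" then acc
        else if tg.contains (rrow.1, cch.1) then acc
        else
          let wall_up := pv_is_wall grid (rrow.1 - 1) cch.1
          let wall_down := pv_is_wall grid (rrow.1 + 1) cch.1
          let wall_left := pv_is_wall grid rrow.1 (cch.1 - 1)
          let wall_right := pv_is_wall grid rrow.1 (cch.1 + 1)
          if (wall_up || wall_down) && (wall_left || wall_right) then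
            acc ++ [(rrow.1, cch.1)]
          else acc) acc) [] =
    (PySem.List.enumerate grid).flatMap (fun rrow =>
      (PySem.List.enumerate rrow.2).filterMap (fun cch =>
        if cch.2 == "$" && !tg.contains (rrow.1, cch.1) &&
           PySem.List.pyGetD (PySem.List.pyGetD (pv_dead_table grid) rrow.1 []) cch.1 false then
          some (rrow.1, cch.1)
        else none)) := by
  refine (PySem.List.foldl_congr_mem (PySem.List.enumerate grid) _
      (fun (acc : List (Int × Int)) (rrow : Int × List String) => acc ++
        ((PySem.List.enumerate rrow.2).filter (fun cch =>
          cch.2 == "$" && !tg.contains (rrow.1, cch.1) &&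
          ((pv_is_wall grid (rrow.1 - 1) cch.1 || pv_is_wall grid (rrow.1 + 1) cch.1) &&
           (pv_is_wall grid rrow.1 (cch.1 - 1) || pv_is_wall grid rrow.1 (cch.1 + 1))))).map
        (fun cch => (rrow.1, cch.1))) []
      (fun acc rrow _ => inner_eq grid tg rrow acc)).trans ?_
  rw [PySem.List.foldl_append_eq_flatMap, List.nil_append]
  refine flatMap_congr_mem ?_
  intro rrow hr
  rw [filterMap_if]
  congr 1
  apply List.filter_congr
  intro cch hc
  rw [dead_lookup grid hr hc]

-- ===== VERDICT (by name: the statement is the Claim_ definition above) =====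
theorem detect_corner_deadlocks_spec : Claim_equal_detect_corner_deadlocks := by
  intro grid targets _
  unfold Spec_detect_corner_deadlocks detect_corner_deadlocks detect_corner_deadlocks_alt
  cases targets with
  | none => exact main_eq grid (pv_get_targets grid)
  | some t => exact main_eq grid t
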